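-- pv_equiv track=rewrite | github.com/dstl/srup | pySRUP/Python/CryptoFunctions.py | recreate_public_key
-- ===== SOURCE A (Python) =====
-- def recreate_public_key(k):
--     kk = '-----BEGIN PUBLIC KEY-----\n'
--     body = ""
--     counter = 0
--     for char in k:
--         body += char
--         counter += 1
--         if counter == 64:
--             body += '\n'
--             counter = 0
--     return kk + body + '\n-----END PUBLIC KEY-----'
-- ===== SOURCE B (Python) =====
-- def recreate_public_key(k):
--     parts = []
--     rest = k
--     while rest:
--         chunk = rest[:64]
--         rest = rest[64:]
--         parts.append(chunk)
--         if len(chunk) == 64: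
--             parts.append('\n')
--     return '-----BEGIN PUBLIC KEY-----\n' + ''.join(parts) + '\n-----END PUBLIC KEY-----'
-- ===== Notes on version B (the rewrite author's own statement) =====
-- stated objective: idiomatic
-- what changed: Replaced the per-character loop with an explicit counter by whole-chunk slicing: take 64-character slices off the front, collect them in a list (plus a newline after every full chunk), and join once.
import Mathlib
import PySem

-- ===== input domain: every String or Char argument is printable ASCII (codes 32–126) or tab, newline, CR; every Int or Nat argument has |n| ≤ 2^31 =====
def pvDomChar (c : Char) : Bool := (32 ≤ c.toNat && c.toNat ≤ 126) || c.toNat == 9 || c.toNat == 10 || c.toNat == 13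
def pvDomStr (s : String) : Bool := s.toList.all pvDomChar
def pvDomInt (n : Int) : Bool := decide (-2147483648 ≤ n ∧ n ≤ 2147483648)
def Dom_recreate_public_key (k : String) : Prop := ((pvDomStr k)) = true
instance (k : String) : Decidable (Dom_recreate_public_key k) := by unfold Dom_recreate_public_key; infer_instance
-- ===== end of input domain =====

-- B replaces A's per-character loop with an int counter by slicing off whole
-- 64-character chunks and joining them once (objective: idiomatic).

-- ===== PORT A =====
-- A's for-loop accumulating (body, counter); strings handled as List Char
-- (exact: '+=' on str is list append of the characters).
-- the loop body: body += char; counter += 1; if counter == 64: body += '\n'; counter = 0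
def pvStep (st : List Char × Int) (char : Char) : List Char × Int :=
  let body := st.1 ++ [char]
  let counter := st.2 + 1
  if counter = 64 then (body ++ ['\n'], 0) else (body, counter)

def recreate_public_key (k : String) : String :=
  let kk : List Char := "-----BEGIN PUBLIC KEY-----\n".toList
  let st := k.toList.foldl pvStep ([], 0)
  String.mk (kk ++ st.1 ++ "\n-----END PUBLIC KEY-----".toList)

-- ===== PORT B =====
-- B's while loop: peel rest[:64] / rest[64:] until empty (slices with
-- nonnegative bounds are List.take/List.drop — exact here), appending a
-- newline after every full chunk; the join is the list concatenation.
def pvAltBody (l : List Char) : List Char :=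
  if l = [] then []
  else
    let chunk := l.take 64
    let rest := l.drop 64
    chunk ++ (if chunk.length = 64 then ['\n'] else []) ++ pvAltBody rest
termination_by l.length
decreasing_by
  rename_i h
  have : l.length ≠ 0 := by simpa [List.length_eq_zero_iff] using h
  simp [List.length_drop]; omega

def recreate_public_key_alt (k : String) : String :=
  String.mk ("-----BEGIN PUBLIC KEY-----\n".toList ++ pvAltBody k.toList
             ++ "\n-----END PUBLIC KEY-----".toList)

-- ===== PRECONDITION & SPEC =====
def Spec_recreate_public_key (k : String) (out : String) : Prop := out = recreate_public_key_alt k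
instance (k : String) (out : String) : Decidable (Spec_recreate_public_key k out) := by unfold Spec_recreate_public_key; infer_instance

-- ===== CLAIM (what is proved, stated in full; the proofs are below) =====
def Claim_equal_recreate_public_key : Prop := ∀ (k : String), Dom_recreate_public_key k → Spec_recreate_public_key k (recreate_public_key k)

-- ===== LEMMAS AND PROOFS =====

-- A's loop, with the accumulated body factored out: the suffix it appends
-- given the current counter.
def pvFA : List Char → Int → List Char
  | [], _ => []
  | x :: xs, c => if c + 1 = 64 then x :: '\n' :: pvFA xs 0 else x :: pvFA xs (c + 1)

theorem pvFoldl_eq (l : List Char) : ∀ (b : List Char) (c : Int),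
    (l.foldl pvStep (b, c)).1 = b ++ pvFA l c := by
  induction l with
  | nil => intro b c; simp [pvFA]
  | cons x xs ih =>
    intro b c
    by_cases h : c + 1 = 64
    · rw [List.foldl_cons, show pvStep (b, c) x = (b ++ [x, '\n'], 0) from by simp [pvStep, h],
        ih, pvFA, if_pos h]
      simp
    · rw [List.foldl_cons, show pvStep (b, c) x = (b ++ [x], c + 1) from by simp [pvStep, h],
        ih, pvFA, if_neg h]
      simp

theorem pvFA_step (l : List Char) : ∀ (c : Int), 0 ≤ c → c < 64 →
    pvFA l c = l.take (64 - c).toNat ++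
      (if (64 - c).toNat ≤ l.length then '\n' :: pvFA (l.drop (64 - c).toNat) 0 else []) := by
  induction l with
  | nil =>
    intro c h0 h1
    simp only [pvFA, List.take_nil, List.length_nil, List.nil_append]
    rw [if_neg (by omega)]
  | cons x xs ih =>
    intro c h0 h1
    by_cases h : c + 1 = 64
    · have hc : c = 63 := by omega
      subst hc
      have h1' : ((64:Int) - 63).toNat = 1 := by decide
      simp [pvFA]
    · have hn : (64 - c).toNat = (64 - (c+1)).toNat + 1 := by omega
      rw [pvFA, if_neg h, hn]
      simp only [List.take_succ_cons, List.drop_succ_cons, List.length_cons]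
      rw [ih (c+1) (by omega) (by omega)]
      have : (64 - (c+1)).toNat + 1 ≤ xs.length + 1 ↔ (64 - (c+1)).toNat ≤ xs.length := by omega
      simp [this]

theorem pvFA_zero_eq : ∀ (n : ℕ) (l : List Char), l.length ≤ n → pvFA l 0 = pvAltBody l := by
  intro n
  induction n with
  | zero =>
    intro l hl
    have : l = [] := by simpa [List.length_eq_zero_iff] using Nat.le_zero.mp hl
    subst this; simp [pvFA, pvAltBody]
  | succ n ih =>
    intro l hl
    by_cases hnil : l = []
    · subst hnil; simp [pvFA, pvAltBody]
    · rw [pvFA_step l 0 (by omega) (by omega)]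
      rw [pvAltBody, if_neg hnil]
      have h64 : ((64:Int) - 0).toNat = 64 := by decide
      rw [h64]
      by_cases hlen : 64 ≤ l.length
      · have hch : (l.take 64).length = 64 := by simp [List.length_take]; omega
        have hrec : pvFA (l.drop 64) 0 = pvAltBody (l.drop 64) := by
          apply ih; simp [List.length_drop]
          have : l.length ≤ n + 1 := hl
          have hpos : 0 < l.length := List.length_pos_of_ne_nil hnil
          omega
        simp [hlen, hch, hrec]
      · have hch : (l.take 64).length ≠ 64 := by simp [List.length_take]; omega
        have hdrop : l.drop 64 = [] := by
          apply List.drop_eq_nil_of_le; omega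
        simp [hlen, hdrop, pvAltBody]

-- ===== VERDICT (by name: the statement is the Claim_ definition above) =====
theorem recreate_public_key_spec : Claim_equal_recreate_public_key := by
  intro k _
  show _ = _
  unfold recreate_public_key recreate_public_key_alt
  simp only [pvFoldl_eq, List.nil_append, pvFA_zero_eq k.toList.length k.toList le_rfl]
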